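-- pv_equiv track=rewrite | github.com/rashingar/Product-Agent | scraper/pipeline/schema_matcher.py | _summarize_fail_reason
-- ===== SOURCE A (Python) =====
-- from typing import Any
--
-- def _summarize_fail_reason(candidates: list[dict[str, Any]]) -> str:
--     failures = [set(candidate.get("gate_reasons", [])) for candidate in candidates if candidate.get("gate_reasons")]
--     if not failures:
--         return "no_safe_template_match"
--     if all(any(reason in reasons for reason in {"missing_required_labels_any", "missing_required_labels_all", "forbidden_labels_present"}) for reasons in failures):
--         return "discriminator_miss"
--     if all("min_section_overlap" in reasons and reasons <= {"min_section_overlap"} for reasons in failures):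
--         return "insufficient_section_overlap"
--     if all("min_label_overlap" in reasons and reasons <= {"min_label_overlap"} for reasons in failures):
--         return "insufficient_label_overlap"
--     return "no_safe_template_match"
-- ===== SOURCE B (Python) =====
-- from typing import Any
--
-- _DISC = {"missing_required_labels_any", "missing_required_labels_all", "forbidden_labels_present"}
--
--
-- def _classify(reasons) -> str:
--     rs = set(reasons)
--     if not rs.isdisjoint(_DISC):
--         return "disc"
--     if rs == {"min_section_overlap"}:
--         return "section"
--     if rs == {"min_label_overlap"}:
--         return "label"
--     return "other"
--
--
-- def _summarize_fail_reason(candidates: list[dict[str, Any]]) -> str: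
--     tags = {_classify(c.get("gate_reasons", [])) for c in candidates if c.get("gate_reasons")}
--     if not tags:
--         return "no_safe_template_match"
--     if tags == {"disc"}:
--         return "discriminator_miss"
--     if tags == {"section"}:
--         return "insufficient_section_overlap"
--     if tags == {"label"}:
--         return "insufficient_label_overlap"
--     return "no_safe_template_match"
-- ===== Notes on version B (the rewrite author's own statement) =====
-- stated objective: alternative
-- what changed: Classifies each failing candidate once into a mutually exclusive category tag and aggregates the distinct tags into a set compared against singletons, instead of A's three separate universal all()-scans over a list of reason sets; correct because the three per-candidate predicates are pairwise disjoint.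
import Mathlib
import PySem

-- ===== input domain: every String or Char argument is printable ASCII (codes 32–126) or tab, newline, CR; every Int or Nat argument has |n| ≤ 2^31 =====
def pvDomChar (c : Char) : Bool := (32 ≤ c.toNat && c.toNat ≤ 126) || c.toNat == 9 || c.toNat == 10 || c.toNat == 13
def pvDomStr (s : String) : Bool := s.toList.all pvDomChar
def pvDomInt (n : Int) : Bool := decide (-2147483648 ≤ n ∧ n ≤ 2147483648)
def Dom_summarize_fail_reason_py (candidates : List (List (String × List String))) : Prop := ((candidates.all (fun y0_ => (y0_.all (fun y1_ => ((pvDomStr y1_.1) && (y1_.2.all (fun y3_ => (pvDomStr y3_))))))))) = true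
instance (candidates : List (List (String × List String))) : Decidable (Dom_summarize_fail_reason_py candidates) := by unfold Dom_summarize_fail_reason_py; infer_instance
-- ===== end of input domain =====

-- B replaces A's list of reason-sets and its three universal all()-scans by classifying each
-- failing candidate once into a mutually exclusive category tag and comparing the set of
-- distinct tags against singletons (objective: alternative decomposition, same cost).

-- ===== PORT A =====
-- candidate.get("gate_reasons", [])
-- first-match lookup in the association list: exact for Python's dict.get(k, [])
def pvGateReasons (candidate : List (String × List String)) : List String :=
  ((candidate.find? (fun p => p.1 == "gate_reasons")).map (·.2)).getD []

-- failures = [set(candidate.get("gate_reasons", [])) for candidate in candidates if candidate.get("gate_reasons")]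
def pvFailures (candidates : List (List (String × List String))) : List (PySem.Set String) :=
  (candidates.filter (fun c => !(pvGateReasons c).isEmpty)).map
    (fun c => PySem.Set.ofList (pvGateReasons c))

def summarize_fail_reason_py (candidates : List (List (String × List String))) : String :=
  let failures := pvFailures candidates
  if failures.isEmpty then "no_safe_template_match"
  else if failures.all (fun reasons =>
      (PySem.Set.ofList ["missing_required_labels_any", "missing_required_labels_all", "forbidden_labels_present"]).any
        (fun reason => reasons.contains reason)) then "discriminator_miss"
  else if failures.all (fun reasons =>
      reasons.contains "min_section_overlap" &&
      PySem.Set.issubset reasons (PySem.Set.ofList ["min_section_overlap"])) then "insufficient_section_overlap"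
  else if failures.all (fun reasons =>
      reasons.contains "min_label_overlap" &&
      PySem.Set.issubset reasons (PySem.Set.ofList ["min_label_overlap"])) then "insufficient_label_overlap"
  else "no_safe_template_match"

-- ===== PORT B =====
def pvDiscSet : PySem.Set String :=
  PySem.Set.ofList ["missing_required_labels_any", "missing_required_labels_all", "forbidden_labels_present"]

-- _classify(reasons): one mutually exclusive category tag per candidate
def pvClassify (reasons : List String) : String :=
  if !(PySem.Set.isdisjoint (PySem.Set.ofList reasons) pvDiscSet) then "disc"
  else if PySem.Set.equal (PySem.Set.ofList reasons) (PySem.Set.ofList ["min_section_overlap"]) then "section"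
  else if PySem.Set.equal (PySem.Set.ofList reasons) (PySem.Set.ofList ["min_label_overlap"]) then "label"
  else "other"

-- tags = {_classify(...) for c in candidates if c.get("gate_reasons")}
def pvTags (candidates : List (List (String × List String))) : PySem.Set String :=
  PySem.Set.ofList
    ((candidates.filter (fun c => !(pvGateReasons c).isEmpty)).map
      (fun c => pvClassify (pvGateReasons c)))

def summarize_fail_reason_py_alt (candidates : List (List (String × List String))) : String :=
  let tags := pvTags candidates
  if tags.isEmpty then "no_safe_template_match"
  else if PySem.Set.equal tags (PySem.Set.ofList ["disc"]) then "discriminator_miss"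
  else if PySem.Set.equal tags (PySem.Set.ofList ["section"]) then "insufficient_section_overlap"
  else if PySem.Set.equal tags (PySem.Set.ofList ["label"]) then "insufficient_label_overlap"
  else "no_safe_template_match"

-- ===== PRECONDITION & SPEC =====
def Spec_summarize_fail_reason_py (candidates : List (List (String × List String))) (out : String) : Prop := out = summarize_fail_reason_py_alt candidates
instance (candidates : List (List (String × List String))) (out : String) : Decidable (Spec_summarize_fail_reason_py candidates out) := by unfold Spec_summarize_fail_reason_py; infer_instance

-- ===== CLAIM (what is proved, stated in full; the proofs are below) =====
def Claim_equal_summarize_fail_reason_py : Prop := ∀ (candidates : List (List (String × List String))), Dom_summarize_fail_reason_py candidates → Spec_summarize_fail_reason_py candidates (summarize_fail_reason_py candidates)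

-- ===== LEMMAS AND PROOFS =====

-- set(xs) is empty iff xs is
lemma pvOfList_nil_iff (xs : List String) : PySem.Set.ofList xs = [] ↔ xs = [] := by
  cases xs with
  | nil => simp [PySem.Set.ofList_nil]
  | cons x xs => simp [PySem.Set.ofList_cons]

-- set equality with a singleton = membership plus subset (A's section/label predicate shape)
lemma pvEqual_singleton (s : PySem.Set String) (t : String) :
    PySem.Set.equal s (PySem.Set.ofList [t])
      = (s.contains t && PySem.Set.issubset s (PySem.Set.ofList [t])) := by
  rw [Bool.eq_iff_iff]
  simp only [Bool.and_eq_true, PySem.Set.equal_iff, PySem.Set.contains_iff,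
    PySem.Set.issubset_iff, PySem.Set.mem_ofList, List.mem_singleton]
  constructor
  · intro h
    exact ⟨(h t).mpr rfl, fun x hx => (h x).mp hx⟩
  · rintro ⟨ht, hsub⟩ x
    exact ⟨fun hx => hsub x hx, fun hx => hx ▸ ht⟩

-- A's discriminator predicate = "intersects the DISC set"
lemma pvDisc_pred (s : PySem.Set String) :
    (pvDiscSet.any (fun reason => s.contains reason))
      = !(PySem.Set.isdisjoint s pvDiscSet) := by
  rw [Bool.eq_iff_iff]
  simp only [List.any_eq_true, PySem.Set.contains_iff, Bool.not_eq_true',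
    Bool.eq_false_iff, Ne, PySem.Set.isdisjoint_iff]
  push_neg
  constructor
  · rintro ⟨r, hr, hs⟩; exact ⟨r, hs, hr⟩
  · rintro ⟨r, hs, hr⟩; exact ⟨r, hr, hs⟩

-- per-candidate: the classification tag equals t_i iff A's i-th predicate holds
lemma pvClassify_disc (rs : List String) :
    (pvClassify rs == "disc")
      = (pvDiscSet.any (fun reason => (PySem.Set.ofList rs).contains reason)) := by
  rw [pvDisc_pred]
  unfold pvClassify
  split_ifs with h1 h2 h3 <;> simp_all

-- a set equal to a non-DISC singleton is disjoint from DISC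
lemma pvEqual_singleton_disjoint (s : PySem.Set String) (t : String)
    (ht : t ∉ pvDiscSet) (h : PySem.Set.equal s (PySem.Set.ofList [t]) = true) :
    PySem.Set.isdisjoint s pvDiscSet = true := by
  rw [PySem.Set.isdisjoint_iff]
  intro x hx
  rw [PySem.Set.equal_iff] at h
  have := (h x).mp hx
  simp only [PySem.Set.mem_ofList, List.mem_singleton] at this
  exact this ▸ ht

lemma pvClassify_section (rs : List String) :
    (pvClassify rs == "section")
      = ((PySem.Set.ofList rs).contains "min_section_overlap" &&
          PySem.Set.issubset (PySem.Set.ofList rs) (PySem.Set.ofList ["min_section_overlap"])) := by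
  rw [← pvEqual_singleton]
  unfold pvClassify
  split_ifs with h1 h2 h3
  · -- classify = "disc": reasons intersect DISC, so not equal to the section singleton
    cases hb : PySem.Set.equal (PySem.Set.ofList rs) (PySem.Set.ofList ["min_section_overlap"]) with
    | false => decide
    | true => simp [pvEqual_singleton_disjoint _ _ (by decide) hb] at h1
  · rw [h2]; decide
  · rw [Bool.not_eq_true] at h2; rw [h2]; decide
  · rw [Bool.not_eq_true] at h2; rw [h2]; decide

lemma pvClassify_label (rs : List String) :
    (pvClassify rs == "label")
      = ((PySem.Set.ofList rs).contains "min_label_overlap" &&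
          PySem.Set.issubset (PySem.Set.ofList rs) (PySem.Set.ofList ["min_label_overlap"])) := by
  rw [← pvEqual_singleton]
  unfold pvClassify
  split_ifs with h1 h2 h3
  · cases hb : PySem.Set.equal (PySem.Set.ofList rs) (PySem.Set.ofList ["min_label_overlap"]) with
    | false => decide
    | true => simp [pvEqual_singleton_disjoint _ _ (by decide) hb] at h1
  · -- classify = "section": the set is exactly {min_section_overlap}, so not label-equal
    cases hb : PySem.Set.equal (PySem.Set.ofList rs) (PySem.Set.ofList ["min_label_overlap"]) with
    | false => decide
    | true =>
      exfalso
      rw [PySem.Set.equal_iff] at h2 hb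
      have hm : "min_label_overlap" ∈ PySem.Set.ofList rs :=
        (hb "min_label_overlap").mpr (by simp [PySem.Set.mem_ofList])
      have := (h2 "min_label_overlap").mp hm
      simp [PySem.Set.mem_ofList] at this
  · rw [h3]; decide
  · rw [Bool.not_eq_true] at h3; rw [h3]; decide

-- set(xs) equals a singleton set {t} iff xs is nonempty and all its elements are t
lemma pvEqual_ofList_singleton (xs : List String) (t : String) (h : xs ≠ []) :
    PySem.Set.equal (PySem.Set.ofList xs) (PySem.Set.ofList [t])
      = xs.all (fun x => x == t) := by
  rw [Bool.eq_iff_iff, PySem.Set.equal_iff]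
  simp only [List.all_eq_true, beq_iff_eq, PySem.Set.mem_ofList, List.mem_singleton]
  constructor
  · intro hiff x hx; exact (hiff x).mp hx
  · intro hall x
    refine ⟨fun hx => hall x hx, fun hx => ?_⟩
    cases xs with
    | nil => exact absurd rfl h
    | cons a as => rw [hx, ← hall a (List.mem_cons_self ..)]; exact List.mem_cons_self ..

-- ===== VERDICT (by name: the statement is the Claim_ definition above) =====
theorem summarize_fail_reason_py_spec : Claim_equal_summarize_fail_reason_py := by
  intro candidates _
  unfold Spec_summarize_fail_reason_py summarize_fail_reason_py summarize_fail_reason_py_alt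
  set L := candidates.filter (fun c => !(pvGateReasons c).isEmpty) with hL
  have hfail : pvFailures candidates = L.map (fun c => PySem.Set.ofList (pvGateReasons c)) := rfl
  have htags : pvTags candidates = PySem.Set.ofList (L.map (fun c => pvClassify (pvGateReasons c))) := rfl
  simp only [hfail, htags]
  by_cases hEmpty : L = []
  · simp [hEmpty, PySem.Set.ofList_nil]
  · have hmapne : L.map (fun c => pvClassify (pvGateReasons c)) ≠ [] := by
      simpa using hEmpty
    have htagsne : ¬ (PySem.Set.ofList (L.map (fun c => pvClassify (pvGateReasons c)))).isEmpty := by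
      rw [List.isEmpty_iff, pvOfList_nil_iff]; exact hmapne
    have hfailne : ¬ (L.map (fun c => PySem.Set.ofList (pvGateReasons c))).isEmpty := by
      simpa [List.isEmpty_iff] using hEmpty
    simp only [hfailne, htagsne]
    rw [pvEqual_ofList_singleton _ _ hmapne, pvEqual_ofList_singleton _ _ hmapne,
        pvEqual_ofList_singleton _ _ hmapne]
    rw [List.all_map, List.all_map, List.all_map, List.all_map, List.all_map, List.all_map]
    have e1 : ((fun x => x == "disc") ∘ fun c => pvClassify (pvGateReasons c))
        = ((fun reasons => pvDiscSet.any (fun reason => PySem.Set.contains reasons reason)) ∘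
            fun c => PySem.Set.ofList (pvGateReasons c)) := by
      funext c; exact pvClassify_disc (pvGateReasons c)
    have e2 : ((fun x => x == "section") ∘ fun c => pvClassify (pvGateReasons c))
        = ((fun reasons => PySem.Set.contains reasons "min_section_overlap" &&
            PySem.Set.issubset reasons (PySem.Set.ofList ["min_section_overlap"])) ∘
            fun c => PySem.Set.ofList (pvGateReasons c)) := by
      funext c; exact pvClassify_section (pvGateReasons c)
    have e3 : ((fun x => x == "label") ∘ fun c => pvClassify (pvGateReasons c))
        = ((fun reasons => PySem.Set.contains reasons "min_label_overlap" &&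
            PySem.Set.issubset reasons (PySem.Set.ofList ["min_label_overlap"])) ∘
            fun c => PySem.Set.ofList (pvGateReasons c)) := by
      funext c; exact pvClassify_label (pvGateReasons c)
    rw [e1, e2, e3]
    rfl
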